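-- pv_equiv track=rewrite | github.com/thomasmatecki/learnin | pyalgs/dp1.py | optimal_trip
-- ===== SOURCE A (Python) =====
-- from typing import List
--
-- def optimal_trip(xs: List[int]) -> List[int]:
--     """
--     You are going on a long trip. You start on the road at mile post 0.
--     Along the way there are n hotels, at mile posts a_1 < a_2 <...< a_n,
--     where each a i is measured from the starting point.
--
--     The only places you are allowed to stop are at these hotels, but you
--     can choose which of the hotels you stop at.
--
--     You must stop at the final hotel (at distance a n ), which is your
--     destination.
--
--     You’d ideally like to travel 200 miles a day, but this may not be possible
--     (depending on the spacing of the hotels).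
--
--     If you travel x miles during a day, the penalty for that day is (200 − x)^2.
--
--     You want to plan your trip so as to minimize the total penalty—that is, the
--     sum, over all travel days, of the daily penalties.
--
--     Give an efficient algorithm that determines the optimal sequence of hotels
--     at which to stop.
--
--         [190, 250, 410, 700, 850]
--
--     """
--     n = len(xs)
--     xs = [0] + xs
--
--     def _penalty(i, j):
--         """
--         i < j
--         """
--         diff = xs[j] - xs[i]
--         return pow(200 - diff, 2)
--
--     def _total_penalty(idxs: List[int]) -> int:
--         penalty = 0
--         for idx in idxs[1:]:
--             penalty += _penalty(idx - 1, idx)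
--
--         return penalty
--
--     def optimal_to(i) -> List[int]:
--         optimal_path = [*range(i)]
--         min_penalty = _total_penalty(optimal_path)
--         for j in range(1, i):
--             optimal_to_j = optimal_to(j)
--             penalty = _penalty(j, i) + _total_penalty(optimal_to_j)
--             if penalty < min_penalty:
--                 min_penalty = penalty
--                 optimal_path = optimal_to_j
--
--         return optimal_path + [i]
--
--     optimal_trip_ = optimal_to(n)
--     return optimal_trip_[1:-1]
-- ===== SOURCE B (Python) =====
-- from typing import List
--
-- def optimal_trip(xs: List[int]) -> List[int]:
--     # Bottom-up DP: memoize optimal_to per index (exponential recursion -> O(n^2)).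
--     n = len(xs)
--     ys = [0] + xs
--     step = [0] * (n + 1)          # step[k] = penalty of the single leg k-1 -> k
--     prefix = [0] * (n + 1)        # prefix[k] = step[1] + ... + step[k]
--     for k in range(1, n + 1):
--         step[k] = (200 - (ys[k] - ys[k - 1])) ** 2
--         prefix[k] = prefix[k - 1] + step[k]
--     paths = [[0]]                 # paths[i] = optimal_to(i)
--     tv = [0]                      # tv[i] = _total_penalty(paths[i])
--     for i in range(1, n + 1):
--         m = prefix[i - 1]
--         path = list(range(i))
--         t = prefix[i - 1]
--         for j in range(1, i):
--             p = (200 - (ys[i] - ys[j])) ** 2 + tv[j]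
--             if p < m:
--                 m, path, t = p, paths[j], tv[j]
--         paths.append(path + [i])
--         tv.append(t + step[i])
--     return paths[n][1:-1]
-- ===== Notes on version B (the rewrite author's own statement) =====
-- stated objective: faster
-- what changed: B replaces A's exponential recomputation of optimal_to(j) (recomputed recursively inside every loop iteration) by one bottom-up pass that tabulates each index's memoized path and its total penalty, plus precomputed step/prefix penalty tables.
import Mathlib
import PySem

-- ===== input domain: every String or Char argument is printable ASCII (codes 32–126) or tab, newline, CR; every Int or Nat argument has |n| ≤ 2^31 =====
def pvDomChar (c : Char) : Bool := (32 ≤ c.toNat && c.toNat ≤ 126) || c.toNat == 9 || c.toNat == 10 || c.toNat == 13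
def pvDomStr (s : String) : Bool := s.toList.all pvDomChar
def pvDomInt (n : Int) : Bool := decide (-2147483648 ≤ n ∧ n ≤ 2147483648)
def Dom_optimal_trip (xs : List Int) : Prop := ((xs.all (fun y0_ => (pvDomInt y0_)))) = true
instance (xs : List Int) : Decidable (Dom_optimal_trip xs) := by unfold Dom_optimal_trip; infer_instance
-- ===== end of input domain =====

-- B replaces A's exponential recursion by a bottom-up table of memoized optimal_to values (same return value).

-- ===== PORT A =====
-- all list indices in A are nonnegative and in range, so xs[j] is ported as getD
def aPenalty (ys : List Int) (i j : Nat) : Int :=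
  (200 - (ys.getD j 0 - ys.getD i 0)) ^ 2

def aTotalPenalty (ys : List Int) (idxs : List Nat) : Int :=
  (idxs.drop 1).foldl (fun penalty idx => penalty + aPenalty ys (idx - 1) idx) 0

mutual
def aOptimalTo (ys : List Int) (i : Nat) : List Nat :=
  (aLoop ys i 1 (aTotalPenalty ys (List.range i)) (List.range i)).2 ++ [i]
termination_by (i, 1, 0)
def aLoop (ys : List Int) (i j : Nat) (minPenalty : Int) (optimalPath : List Nat) : Int × List Nat :=
  if _h : j < i then
    let optimalToJ := aOptimalTo ys j
    let penalty := aPenalty ys j i + aTotalPenalty ys optimalToJ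
    if penalty < minPenalty then aLoop ys i (j + 1) penalty optimalToJ
    else aLoop ys i (j + 1) minPenalty optimalPath
  else (minPenalty, optimalPath)
termination_by (i, 0, i - j)
end

def optimal_trip (xs : List Int) : List Int :=
  let n := xs.length
  let ys := (0 : Int) :: xs
  let t := (aOptimalTo ys n).map (fun k => (k : Int))
  (t.drop 1).dropLast   -- t[1:-1] on a nonempty list

-- ===== PORT B =====
def optimal_trip_alt (xs : List Int) : List Int :=
  let n := xs.length
  let ys := (0 : Int) :: xs
  -- step / prefix tables (one loop in Source B)
  let sp := (List.range' 1 n).foldl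
    (fun (sp : List Int × List Int) k =>
      let s := (200 - (ys.getD k 0 - ys.getD (k - 1) 0)) ^ 2
      (sp.1 ++ [s], sp.2 ++ [sp.2.getD (k - 1) 0 + s]))
    ([0], [0])
  -- paths / tv tables: paths[i] = memoized optimal_to(i), tv[i] = its total penalty
  let pt := (List.range' 1 n).foldl
    (fun (pt : List (List Nat) × List Int) i =>
      let best := (List.range' 1 (i - 1)).foldl
        (fun (s : Int × List Nat × Int) j =>
          let p := (200 - (ys.getD i 0 - ys.getD j 0)) ^ 2 + pt.2.getD j 0
          if p < s.1 then (p, pt.1.getD j [], pt.2.getD j 0) else s)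
        (sp.2.getD (i - 1) 0, List.range i, sp.2.getD (i - 1) 0)
      (pt.1 ++ [best.2.1 ++ [i]], pt.2 ++ [best.2.2 + sp.1.getD i 0]))
    ([[0]], [0])
  let t := (pt.1.getD n []).map (fun k => (k : Int))
  (t.drop 1).dropLast   -- paths[n][1:-1]

-- ===== PRECONDITION & SPEC =====
def Spec_optimal_trip (xs : List Int) (out : List Int) : Prop := out = optimal_trip_alt xs
instance (xs : List Int) (out : List Int) : Decidable (Spec_optimal_trip xs out) := by unfold Spec_optimal_trip; infer_instance

-- ===== CLAIM (what is proved, stated in full; the proofs are below) =====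
def Claim_equal_optimal_trip : Prop := ∀ (xs : List Int), Dom_optimal_trip xs → Spec_optimal_trip xs (optimal_trip xs)

-- ===== LEMMAS AND PROOFS =====

theorem aLoop_stop (ys : List Int) (i j : Nat) (m : Int) (p : List Nat) (h : ¬ j < i) :
    aLoop ys i j m p = (m, p) := by
  rw [aLoop]; simp [h]

theorem aLoop_step (ys : List Int) (i j : Nat) (m : Int) (p : List Nat) (h : j < i) :
    aLoop ys i j m p =
      if aPenalty ys j i + aTotalPenalty ys (aOptimalTo ys j) < m then
        aLoop ys i (j + 1) (aPenalty ys j i + aTotalPenalty ys (aOptimalTo ys j)) (aOptimalTo ys j)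
      else aLoop ys i (j + 1) m p := by
  rw [aLoop]; simp [h]

theorem aOptimalTo_ne_nil (ys : List Int) (i : Nat) : aOptimalTo ys i ≠ [] := by
  rw [aOptimalTo]; simp

theorem total_append (ys : List Int) (p : List Nat) (i : Nat) (hp : p ≠ []) :
    aTotalPenalty ys (p ++ [i]) = aTotalPenalty ys p + aPenalty ys (i - 1) i := by
  cases p with
  | nil => exact absurd rfl hp
  | cons a p' => simp [aTotalPenalty, List.foldl_append]

theorem total_range_succ (ys : List Int) (i : Nat) (hi : 1 ≤ i) :
    aTotalPenalty ys (List.range (i + 1)) = aTotalPenalty ys (List.range i) + aPenalty ys (i - 1) i := by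
  rw [List.range_succ, total_append]
  simp [List.range_eq_nil]; omega

theorem aLoop_path_ne_nil (ys : List Int) (i j : Nat) (m : Int) (p : List Nat) (hp : p ≠ []) :
    (aLoop ys i j m p).2 ≠ [] := by
  by_cases h : j < i
  · rw [aLoop_step ys i j m p h]
    split
    · exact aLoop_path_ne_nil ys i (j + 1) _ _ (aOptimalTo_ne_nil ys j)
    · exact aLoop_path_ne_nil ys i (j + 1) _ _ hp
  · rw [aLoop_stop ys i j m p h]; exact hp
termination_by i - j
decreasing_by all_goals omega

-- generic invariant for a fold over range(1, m+1)
theorem foldl_range'_invariant {alpha : Type} (f : alpha → Nat → alpha) (init : alpha)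
    (P : Nat → alpha → Prop) (h0 : P 0 init)
    (hstep : ∀ q st, P q st → P (q + 1) (f st (1 + q))) :
    ∀ m, P m ((List.range' 1 m).foldl f init) := by
  intro m
  induction m with
  | zero => exact h0
  | succ q ih =>
    rw [List.range'_1_concat, List.foldl_append, List.foldl_cons, List.foldl_nil]
    exact hstep q _ ih

theorem inner_eq (ys : List Int) (i : Nat) (paths : List (List Nat)) (tv : List Int)
    (H : ∀ j, 1 ≤ j → j < i →
      paths.getD j [] = aOptimalTo ys j ∧ tv.getD j 0 = aTotalPenalty ys (aOptimalTo ys j)) :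
    ∀ (cnt j : Nat) (m : Int) (p : List Nat), 1 ≤ j → j + cnt = i →
    (List.range' j cnt).foldl
      (fun (s : Int × List Nat × Int) k =>
        let pp := (200 - (ys.getD i 0 - ys.getD k 0)) ^ 2 + tv.getD k 0
        if pp < s.1 then (pp, paths.getD k [], tv.getD k 0) else s)
      (m, p, aTotalPenalty ys p)
    = ((aLoop ys i j m p).1, (aLoop ys i j m p).2, aTotalPenalty ys (aLoop ys i j m p).2) := by
  intro cnt
  induction cnt with
  | zero =>
    intro j m p hj hij
    rw [aLoop_stop ys i j m p (by omega)]
    simp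
  | succ c ih =>
    intro j m p hj hij
    have hji : j < i := by omega
    rw [List.range'_succ, List.foldl_cons]
    obtain ⟨h1, h2⟩ := H j hj hji
    rw [aLoop_step ys i j m p hji]
    have hpen : (200 - (ys.getD i 0 - ys.getD j 0)) ^ 2 = aPenalty ys j i := rfl
    simp only [h1, h2, hpen]
    by_cases hc : aPenalty ys j i + aTotalPenalty ys (aOptimalTo ys j) < m
    · simp only [if_pos hc]
      exact ih (j + 1) _ _ (by omega) (by omega)
    · simp only [if_neg hc]
      exact ih (j + 1) m p (by omega) (by omega)

-- invariant of B's step/prefix table loop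
def TablesP (ys : List Int) (q : Nat) (sp : List Int × List Int) : Prop :=
  sp.1.length = q + 1 ∧ sp.2.length = q + 1 ∧
  (∀ k, 1 ≤ k → k ≤ q → sp.1.getD k 0 = aPenalty ys (k - 1) k) ∧
  (∀ k, k ≤ q → sp.2.getD k 0 = aTotalPenalty ys (List.range (k + 1)))

theorem tables_inv (ys : List Int) (m : Nat) :
    TablesP ys m ((List.range' 1 m).foldl
      (fun (sp : List Int × List Int) k =>
        let s := (200 - (ys.getD k 0 - ys.getD (k - 1) 0)) ^ 2
        (sp.1 ++ [s], sp.2 ++ [sp.2.getD (k - 1) 0 + s]))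
      ([0], [0])) := by
  apply foldl_range'_invariant
  · refine ⟨rfl, rfl, by omega, ?_⟩
    intro k hk
    interval_cases k
    show (0 : Int) = aTotalPenalty ys (List.range 1)
    simp [aTotalPenalty, List.range_succ]
  · intro q st hq
    obtain ⟨hl1, hl2, hs, hp⟩ := hq
    have hi1 : (1 + q : Nat) = q + 1 := by omega
    have hq1 : (1 + q - 1 : Nat) = q := by omega
    refine ⟨by simp [hl1], by simp [hl2], ?_, ?_⟩
    · intro k h1 h2
      rcases Nat.lt_or_ge k (q + 1) with hlt | hge
      · show (st.1 ++ _).getD k 0 = _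
        rw [List.getD_append _ _ _ _ (by omega)]
        exact hs k h1 (by omega)
      · have hk : k = q + 1 := by omega
        subst hk
        show (st.1 ++ _).getD (q + 1) 0 = _
        rw [List.getD_append_right _ _ _ _ (by omega), hl1]
        have h0 : q + 1 - (q + 1) = 0 := by omega
        rw [h0, List.getD_cons_zero, hq1, hi1]
        simp [aPenalty]
    · intro k hk
      rcases Nat.lt_or_ge k (q + 1) with hlt | hge
      · show (st.2 ++ _).getD k 0 = _
        rw [List.getD_append _ _ _ _ (by omega)]
        exact hp k (by omega)
      · have hk' : k = q + 1 := by omega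
        subst hk'
        show (st.2 ++ _).getD (q + 1) 0 = _
        rw [List.getD_append_right _ _ _ _ (by omega), hl2]
        have h0 : q + 1 - (q + 1) = 0 := by omega
        rw [h0, List.getD_cons_zero, hq1, hi1, hp q (by omega)]
        have hts := total_range_succ ys (q + 1) (by omega)
        simp only [Nat.add_sub_cancel] at hts
        rw [hts]
        simp [aPenalty]

-- invariant of B's main DP loop
def OuterP (ys : List Int) (q : Nat) (pt : List (List Nat) × List Int) : Prop :=
  pt.1.length = q + 1 ∧ pt.2.length = q + 1 ∧
  ∀ j, j ≤ q → pt.1.getD j [] = aOptimalTo ys j ∧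
    pt.2.getD j 0 = aTotalPenalty ys (aOptimalTo ys j)

theorem outer_inv (ys : List Int) (step pfx : List Int) (n : Nat)
    (hstep : ∀ k, 1 ≤ k → k ≤ n → step.getD k 0 = aPenalty ys (k - 1) k)
    (hpfx : ∀ k, k ≤ n → pfx.getD k 0 = aTotalPenalty ys (List.range (k + 1)))
    (m : Nat) :
    m ≤ n → OuterP ys m ((List.range' 1 m).foldl
      (fun (pt : List (List Nat) × List Int) i =>
        let best := (List.range' 1 (i - 1)).foldl
          (fun (s : Int × List Nat × Int) j =>
            let p := (200 - (ys.getD i 0 - ys.getD j 0)) ^ 2 + pt.2.getD j 0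
            if p < s.1 then (p, pt.1.getD j [], pt.2.getD j 0) else s)
          (pfx.getD (i - 1) 0, List.range i, pfx.getD (i - 1) 0)
        (pt.1 ++ [best.2.1 ++ [i]], pt.2 ++ [best.2.2 + step.getD i 0]))
      ([[0]], [0])) := by
  apply foldl_range'_invariant _ _ (fun q st => q ≤ n → OuterP ys q st)
  · intro _
    refine ⟨rfl, rfl, ?_⟩
    intro j hj
    interval_cases j
    constructor
    · show [0] = aOptimalTo ys 0
      rw [aOptimalTo, aLoop_stop ys 0 1 _ _ (by omega)]
      simp
    · show (0 : Int) = aTotalPenalty ys (aOptimalTo ys 0)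
      rw [aOptimalTo, aLoop_stop ys 0 1 _ _ (by omega)]
      simp [aTotalPenalty]
  · intro q st ih hqn
    obtain ⟨hl1, hl2, hinv⟩ := ih (by omega)
    have hi1 : (1 + q : Nat) = q + 1 := by omega
    have hq1 : (1 + q - 1 : Nat) = q := by omega
    have hinit : pfx.getD (1 + q - 1) 0 = aTotalPenalty ys (List.range (1 + q)) := by
      rw [hq1, hpfx q (by omega), hi1]
    have Hsmall : ∀ j, 1 ≤ j → j < 1 + q →
        st.1.getD j [] = aOptimalTo ys j ∧ st.2.getD j 0 = aTotalPenalty ys (aOptimalTo ys j) := by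
      intro j h1 h2
      exact hinv j (by omega)
    have hinner := inner_eq ys (1 + q) st.1 st.2 Hsmall (1 + q - 1) 1
      (aTotalPenalty ys (List.range (1 + q))) (List.range (1 + q)) (by omega) (by omega)
    have hrne : (aLoop ys (1 + q) 1 (aTotalPenalty ys (List.range (1 + q)))
        (List.range (1 + q))).2 ≠ [] :=
      aLoop_path_ne_nil ys (1 + q) 1 _ _ (by simp [List.range_eq_nil])
    have hopt : (aLoop ys (1 + q) 1 (aTotalPenalty ys (List.range (1 + q)))
        (List.range (1 + q))).2 ++ [1 + q] = aOptimalTo ys (1 + q) := by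
      rw [aOptimalTo]
    have htot : aTotalPenalty ys (aLoop ys (1 + q) 1 (aTotalPenalty ys (List.range (1 + q)))
          (List.range (1 + q))).2 + step.getD (1 + q) 0
        = aTotalPenalty ys (aOptimalTo ys (1 + q)) := by
      rw [← hopt, total_append ys _ (1 + q) hrne, hstep (1 + q) (by omega) (by omega)]
    dsimp only
    rw [hinit, hinner]
    dsimp only
    refine ⟨by simp [hl1], by simp [hl2], ?_⟩
    intro j hj
    rcases Nat.lt_or_ge j (q + 1) with hlt | hge
    · obtain ⟨c1, c2⟩ := hinv j (by omega)
      exact ⟨by rw [List.getD_append _ _ _ _ (by omega)]; exact c1,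
             by rw [List.getD_append _ _ _ _ (by omega)]; exact c2⟩
    · have hj' : j = q + 1 := by omega
      subst hj'
      constructor
      · rw [List.getD_append_right _ _ _ _ (by omega), hl1]
        have h0 : q + 1 - (q + 1) = 0 := by omega
        rw [h0, List.getD_cons_zero, ← hi1, hopt]
      · rw [List.getD_append_right _ _ _ _ (by omega), hl2]
        have h0 : q + 1 - (q + 1) = 0 := by omega
        rw [h0, List.getD_cons_zero, ← hi1, htot]

-- ===== VERDICT (by name: the statement is the Claim_ definition above) =====
theorem optimal_trip_spec : Claim_equal_optimal_trip := by
  intro xs _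
  show optimal_trip xs = optimal_trip_alt xs
  simp only [optimal_trip, optimal_trip_alt]
  obtain ⟨tl1, tl2, ts, tp⟩ := tables_inv ((0 : Int) :: xs) xs.length
  obtain ⟨ol1, ol2, oinv⟩ := outer_inv ((0 : Int) :: xs) _ _ xs.length
    (fun k h1 h2 => ts k h1 h2) (fun k hk => tp k hk) xs.length (le_refl _)
  obtain ⟨c1, _⟩ := oinv xs.length (le_refl _)
  rw [c1]
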